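-- pv_equiv track=rewrite | github.com/vahndi/ux | ux/utils/factories/location_factory.py | forward_back
-- ===== SOURCE A (Python) =====
-- from typing import List, Iterator, Tuple
--
-- def forward_back(locations: List[str], forwards: int, backwards: int) -> Iterator[Tuple[str, str]]:
--     """
--     Generate a sequence of sources and targets that goes forwards and backwards through the locations.
--
--     :rtype: Iterator[Tuple[str, str]]
--     :return: Iterator[Tuple[source, target]]
--     """
--     assert forwards > backwards, 'forwards must be greater than backwards'
--     add_sequence = [1] * forwards + [-1] * backwards
--     target = None
--     i_source = 0
--     sources_targets = []
--     while target != locations[-1]: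
--         for add in add_sequence:
--             source = locations[i_source]
--             target = locations[i_source + add]
--             i_source += add
--             sources_targets.append((source, target))
--             if target == locations[-1]:
--                 break
--     return sources_targets
-- ===== SOURCE B (Python) =====
-- from typing import List, Tuple
--
--
-- def forward_back(locations: List[str], forwards: int, backwards: int) -> List[Tuple[str, str]]:
--     """
--     Closed-form rewrite: the index visited after t steps of the zigzag is a
--     pure function pos(t) of t (arithmetic on divmod(t, period)), so there is
--     no cursor and no step list at all: search for the first step t whose
--     location equals the last one, then emit the pairs by mapping pos over
--     range(t).
--     """
--     assert forwards > backwards, 'forwards must be greater than backwards'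
--     period = forwards + backwards
--     net = forwards - backwards
--
--     def pos(t: int) -> int:
--         c, r = divmod(t, period)
--         return c * net + (r if r <= forwards else 2 * forwards - r)
--
--     last = locations[-1]
--     t = 1
--     while locations[pos(t)] != last:
--         t += 1
--     return [(locations[pos(k)], locations[pos(k + 1)]) for k in range(t)]
-- ===== Notes on version B (the rewrite author's own statement) =====
-- stated objective: alternative
-- what changed: B replaces A's stateful zigzag simulation (cursor stepped through a materialised [1]*f+[-1]*b pattern inside nested while/for loops) by a closed-form index function pos(t) computed from divmod(t, period): it searches for the first step t whose location equals the last one and then maps pos over range(t) to emit the pairs, with no cursor, no step list and no interleaved appending.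
-- outside the precondition, e.g. on forward_back(['a', 'b'], 1, -1): A returns [('a', 'b')], B raises ZeroDivisionError
import Mathlib
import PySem

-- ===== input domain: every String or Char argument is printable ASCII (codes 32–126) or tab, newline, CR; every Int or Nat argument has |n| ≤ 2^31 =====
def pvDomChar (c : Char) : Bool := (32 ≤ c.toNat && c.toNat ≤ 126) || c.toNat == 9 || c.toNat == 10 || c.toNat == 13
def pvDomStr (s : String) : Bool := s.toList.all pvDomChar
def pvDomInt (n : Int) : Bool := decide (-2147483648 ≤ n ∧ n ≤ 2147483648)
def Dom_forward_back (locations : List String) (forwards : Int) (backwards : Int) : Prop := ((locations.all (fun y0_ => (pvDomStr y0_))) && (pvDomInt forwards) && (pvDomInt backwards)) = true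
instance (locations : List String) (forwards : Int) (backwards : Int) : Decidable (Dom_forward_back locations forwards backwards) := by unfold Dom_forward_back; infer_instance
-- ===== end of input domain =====

-- B replaces A's stateful cursor-and-step-list simulation by a closed-form index
-- function pos(t) on divmod(t, period): search the first hitting step, then map
-- pos over range(t); objective: alternative.

-- shared indexing helper: locations[i] (Python raises on out-of-range; Pre_ keeps
-- every used index in range, so the "" default is never the returned value inside Pre_)
def fbGet (L : List String) (i : Int) : String := (PySem.List.pyGet? L i).getD ""

-- ===== PORT A =====
-- the `for add in add_sequence` body with break; returns (appended pairs, i_source, target)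
def fbInner (L : List String) (last : String) : List Int → Int → Option String → (List (String × String) × Int × Option String)
  | [], i, tgt => ([], i, tgt)
  | add :: rest, i, _tgt =>
    let source := fbGet L i
    let target := fbGet L (i + add)
    let i' := i + add
    if target = last then ([(source, target)], i', some target)
    else
      let r := fbInner L last rest i' (some target)
      ((source, target) :: r.1, r.2.1, r.2.2)

-- the `while target != locations[-1]` loop; fuel = locations.length cycles is
-- enough for every input on which the Python loop terminates
def fbWhile (L : List String) (last : String) (seq : List Int) : Nat → Option String → Int → List (String × String)
  | 0, _, _ => []
  | fuel + 1, tgt, i =>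
    if tgt = some last then []
    else
      let r := fbInner L last seq i tgt
      r.1 ++ fbWhile L last seq fuel r.2.2 r.2.1

def forward_back (locations : List String) (forwards : Int) (backwards : Int) : List (String × String) :=
  let add_sequence : List Int := List.replicate forwards.toNat 1 ++ List.replicate backwards.toNat (-1)
  let last := fbGet locations (-1)
  fbWhile locations last add_sequence locations.length none 0

-- ===== PORT B =====
-- pos(t): the index visited after t steps, closed-form on divmod(t, period);
-- Python raises ZeroDivisionError when period = 0 (the none branch, outside Pre_)
def fbPos (f b t : Int) : Int :=
  match PySem.Int.divmod? t (f + b) with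
  | some (c, r) => c * (f - b) + (if r ≤ f then r else 2 * f - r)
  | none => 0

-- the `t = 1; while locations[pos(t)] != last: t += 1` search; fuel bounds the
-- number of loop iterations (inside Pre_ the search hits well before it runs out)
def fbFind (L : List String) (last : String) (f b : Int) : Nat → Int → Int
  | 0, t => t
  | fuel + 1, t => if fbGet L (fbPos f b t) = last then t else fbFind L last f b fuel (t + 1)

def forward_back_alt (locations : List String) (forwards : Int) (backwards : Int) : List (String × String) :=
  let last := fbGet locations (-1)
  let tstar := fbFind locations last forwards backwards (locations.length * (forwards + backwards).toNat) 1
  -- [(locations[pos(k)], locations[pos(k+1)]) for k in range(tstar)]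
  (PySem.List.pyRange 0 tstar 1).map
    (fun k => (fbGet locations (fbPos forwards backwards k), fbGet locations (fbPos forwards backwards (k + 1))))

-- ===== PRECONDITION & SPEC =====
-- Pre_ restricts to the task's natural domain: it excludes the inputs on which A
-- raises or never returns (fewer than 2 locations → IndexError; forwards ≤ backwards
-- → AssertionError; an empty step pattern → infinite loop) and negative backwards —
-- a negative count, outside the natural domain, on which A still returns by silently
-- treating it as 0 via list replication (cited in claim.json; B raises there).
def Pre_forward_back (locations : List String) (forwards : Int) (backwards : Int) : Prop :=
  2 ≤ locations.length ∧ 0 ≤ backwards ∧ backwards < forwards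
instance (locations : List String) (forwards : Int) (backwards : Int) : Decidable (Pre_forward_back locations forwards backwards) := by unfold Pre_forward_back; infer_instance

def pvWitness_forward_back : List String × Int × Int := (["a", "b", "c"], 2, 1)

def Spec_forward_back (locations : List String) (forwards : Int) (backwards : Int) (out : List (String × String)) : Prop := out = forward_back_alt locations forwards backwards
instance (locations : List String) (forwards : Int) (backwards : Int) (out : List (String × String)) : Decidable (Spec_forward_back locations forwards backwards out) := by unfold Spec_forward_back; infer_instance

-- ===== CLAIM (what is proved, stated in full; the proofs are below) =====
def Claim_equal_forward_back : Prop := ∀ (locations : List String) (forwards : Int) (backwards : Int), Dom_forward_back locations forwards backwards → Pre_forward_back locations forwards backwards → Spec_forward_back locations forwards backwards (forward_back locations forwards backwards)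

-- ===== LEMMAS AND PROOFS =====

-- the index walk A performs, one list cell per step (bridge between the two ports)
def fbWalk (L : List String) (last : String) (seq : List Int) : Nat → Nat → Int → List Int
  | 0, _, _ => []
  | fuel + 1, k, c =>
    let c' := c + seq.getD (k % seq.length) 0
    c' :: (if fbGet L c' = last then [] else fbWalk L last seq fuel (k + 1) c')

-- pair emission along an index path
def fbPairs (L : List String) : Int → List Int → List (String × String)
  | _, [] => []
  | i, j :: p => (fbGet L i, fbGet L j) :: fbPairs L j p

theorem fbWhile_stop (L : List String) (last : String) (seq : List Int) :
    ∀ (F : Nat) (i : Int), fbWhile L last seq F (some last) i = [] := by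
  intro F i
  cases F with
  | zero => rfl
  | succ F => simp [fbWhile]

theorem fbWhile_nil (L : List String) (last : String) :
    ∀ (F : Nat) (tgt : Option String) (i : Int), fbWhile L last [] F tgt i = [] := by
  intro F
  induction F with
  | zero => intro tgt i; rfl
  | succ F ih =>
    intro tgt i
    simp only [fbWhile, fbInner]
    split
    · rfl
    · simpa using ih tgt i

-- A-side invariant: A's remaining computation (finish the current pass over
-- `rest`, then keep looping with fuel Fa) equals the pairs along the step walk
-- with step budget Fa * n + rest.length, when k % n points at `rest`.
theorem fb_main (L : List String) (last : String) (seq : List Int) :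
    ∀ (Fa : Nat) (rest : List Int) (k : Nat) (c : Int) (tgt : Option String),
      rest ≠ [] → seq.drop (k % seq.length) = rest →
      k % seq.length + rest.length = seq.length → tgt ≠ some last →
      (fbInner L last rest c tgt).1 ++
          fbWhile L last seq Fa (fbInner L last rest c tgt).2.2 (fbInner L last rest c tgt).2.1
        = fbPairs L c (fbWalk L last seq (Fa * seq.length + rest.length) k c) := by
  intro Fa
  induction Fa with
  | zero =>
    intro rest
    induction rest with
    | nil => intro k c tgt h; exact absurd rfl h
    | cons add rest ih =>
      intro k c tgt _ hdrop hlen htgt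
      have hget : seq.getD (k % seq.length) 0 = add := by
        have h1 : seq[k % seq.length]? = some add := by
          rw [← List.head?_drop, hdrop]; rfl
        rw [List.getD_eq_getElem?_getD, h1]; rfl
      have hfuel : 0 * seq.length + (add :: rest).length = (0 * seq.length + rest.length) + 1 := by
        simp only [List.length_cons]; omega
      rw [hfuel]
      simp only [fbInner, fbWalk, hget]
      by_cases hbr : fbGet L (c + add) = last
      · simp only [if_pos hbr]
        simp [fbWhile_stop, hbr, fbPairs]
      · simp only [if_neg hbr]
        by_cases hrne : rest = []
        · subst hrne
          simp [fbInner, fbWhile, fbWalk, fbPairs]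
        · have hm1 : k % seq.length + 1 < seq.length := by
            have : 1 ≤ rest.length := by
              cases rest with | nil => exact absurd rfl hrne | cons _ _ => simp
            simp only [List.length_cons] at hlen; omega
          have h2n : 1 < seq.length := by omega
          have hk1 : (k + 1) % seq.length = k % seq.length + 1 := by
            rw [Nat.add_mod, Nat.mod_eq_of_lt h2n]
            exact Nat.mod_eq_of_lt (by omega)
          have hdrop1 : seq.drop ((k + 1) % seq.length) = rest := by
            rw [hk1]
            have hdd : seq.drop (k % seq.length + 1) = (seq.drop (k % seq.length)).drop 1 := by
              rw [List.drop_drop]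
            rw [hdd, hdrop]; rfl
          have hlen1 : (k + 1) % seq.length + rest.length = seq.length := by
            rw [hk1]; simp only [List.length_cons] at hlen; omega
          have hrec := ih (k + 1) (c + add) (some (fbGet L (c + add))) hrne hdrop1 hlen1
            (by simp [hbr])
          simp only [fbPairs]
          rw [← hrec]
          simp
  | succ Fa ihFa =>
    intro rest
    induction rest with
    | nil => intro k c tgt h; exact absurd rfl h
    | cons add rest ih =>
      intro k c tgt _ hdrop hlen htgt
      have hget : seq.getD (k % seq.length) 0 = add := by
        have h1 : seq[k % seq.length]? = some add := by
          rw [← List.head?_drop, hdrop]; rfl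
        rw [List.getD_eq_getElem?_getD, h1]; rfl
      have hfuel : (Fa + 1) * seq.length + (add :: rest).length
          = ((Fa + 1) * seq.length + rest.length) + 1 := by
        simp only [List.length_cons]; omega
      rw [hfuel]
      simp only [fbInner, fbWalk, hget]
      by_cases hbr : fbGet L (c + add) = last
      · simp only [if_pos hbr]
        simp [fbWhile_stop, hbr, fbPairs]
      · simp only [if_neg hbr]
        by_cases hrne : rest = []
        · -- end of the pattern: the next round refills with the full seq
          subst hrne
          have hseqne : seq ≠ [] := by
            intro h; rw [h] at hlen; simp at hlen
          have hn1 : 1 ≤ seq.length := by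
            cases seq with | nil => exact absurd rfl hseqne | cons _ _ => simp
          have hm : k % seq.length = seq.length - 1 := by
            simp only [List.length_cons, List.length_nil] at hlen; omega
          have hk0 : (k + 1) % seq.length = 0 := by
            rw [Nat.add_mod, hm]
            rcases eq_or_lt_of_le hn1 with h | h
            · rw [← h]
            · rw [Nat.mod_eq_of_lt h]
              have hs : seq.length - 1 + 1 = seq.length := by omega
              rw [hs, Nat.mod_self]
          have hrec := ihFa seq (k + 1) (c + add) (some (fbGet L (c + add))) hseqne
            (by rw [hk0]; rfl) (by rw [hk0]; simp) (by simp [hbr])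
          have hfa : Fa * seq.length + seq.length = (Fa + 1) * seq.length := by ring
          rw [hfa] at hrec
          simp only [fbInner, fbPairs, List.length_nil, Nat.add_zero]
          rw [fbWhile]
          simp only [if_neg (show ¬ (some (fbGet L (c + add)) = some last) by simp [hbr])]
          rw [hrec]
          simp
        · have hm1 : k % seq.length + 1 < seq.length := by
            have : 1 ≤ rest.length := by
              cases rest with | nil => exact absurd rfl hrne | cons _ _ => simp
            simp only [List.length_cons] at hlen; omega
          have h2n : 1 < seq.length := by omega
          have hk1 : (k + 1) % seq.length = k % seq.length + 1 := by
            rw [Nat.add_mod, Nat.mod_eq_of_lt h2n]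
            exact Nat.mod_eq_of_lt (by omega)
          have hdrop1 : seq.drop ((k + 1) % seq.length) = rest := by
            rw [hk1]
            have hdd : seq.drop (k % seq.length + 1) = (seq.drop (k % seq.length)).drop 1 := by
              rw [List.drop_drop]
            rw [hdd, hdrop]; rfl
          have hlen1 : (k + 1) % seq.length + rest.length = seq.length := by
            rw [hk1]; simp only [List.length_cons] at hlen; omega
          have hrec := ih (k + 1) (c + add) (some (fbGet L (c + add))) hrne hdrop1 hlen1
            (by simp [hbr])
          simp only [fbPairs]
          rw [← hrec]
          simp

-- A equals the pairs along the step walk (restated head of the old port proof)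
theorem A_eq_pairs (L : List String) (f b : Int) :
    forward_back L f b
      = fbPairs L 0
          (fbWalk L (fbGet L (-1)) (List.replicate f.toNat 1 ++ List.replicate b.toNat (-1))
            (L.length * (List.replicate f.toNat 1 ++ List.replicate b.toNat (-1)).length) 0 0) := by
  unfold forward_back
  set seq : List Int := List.replicate f.toNat 1 ++ List.replicate b.toNat (-1) with hseq
  set last := fbGet L (-1) with hlast
  by_cases hnil : seq = []
  · rw [hnil, fbWhile_nil]
    simp [fbWalk, fbPairs]
  · cases hL : L.length with
    | zero => simp [fbWalk, fbPairs, fbWhile]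
    | succ F =>
      rw [fbWhile]
      simp only [if_neg (show ¬ ((none : Option String) = some last) by simp)]
      have hrec := fb_main L last seq F seq 0 0 none hnil (by simp) (by simp) (by simp)
      rw [hrec]
      have hfa : F * seq.length + seq.length = (F + 1) * seq.length := by ring
      rw [hfa]

-- divmod? at a positive divisor, in floordiv/mod form
theorem divmod_pos (t p : Int) (hp : 0 < p) :
    PySem.Int.divmod? t p = some (PySem.Int.floordiv t p, PySem.Int.mod t p) := by
  simp [PySem.Int.divmod?, PySem.Int.floordiv, PySem.Int.mod, hp.ne.symm]

-- the step entry of the pattern at offset r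
theorem seq_getD (f b : Int) (hb : 0 ≤ b) (hbf : b < f) (r : Nat) (hr : (r : Int) < f + b) :
    (List.replicate f.toNat 1 ++ List.replicate b.toNat (-1) : List Int).getD r 0
      = if (r : Int) < f then 1 else -1 := by
  by_cases h : r < f.toNat
  · rw [if_pos (by omega)]
    rw [List.getD_eq_getElem?_getD, List.getElem?_append_left (by simpa using h)]
    simp [h]
  · rw [if_neg (by omega)]
    rw [List.getD_eq_getElem?_getD, List.getElem?_append_right (by simpa using h)]
    simp only [List.length_replicate, List.getElem?_replicate]
    rw [if_pos (by omega)]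
    rfl

-- pos(t) in explicit quotient/remainder form
theorem fbPos_eval (f b t : Int) (hp : 0 < f + b) :
    fbPos f b t
      = PySem.Int.floordiv t (f + b) * (f - b)
        + (if PySem.Int.mod t (f + b) ≤ f then PySem.Int.mod t (f + b)
           else 2 * f - PySem.Int.mod t (f + b)) := by
  unfold fbPos
  rw [divmod_pos _ _ hp]

theorem fbPos_zero (f b : Int) (hp : 0 < f + b) (hf : 0 ≤ f) : fbPos f b 0 = 0 := by
  rw [fbPos_eval f b 0 hp]
  have h0 : PySem.Int.floordiv 0 (f + b) = 0 := by
    rw [PySem.Int.floordiv_eq_iff_of_pos hp]; omega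
  have hm := PySem.Int.floordiv_mul_add_mod 0 (f + b)
  rw [h0] at hm ⊢
  simp at hm ⊢
  omega

-- the closed form steps exactly by the pattern entry: pos(t+1) = pos(t) + seq[t % p]
theorem fbPos_step (f b t : Int) (hb : 0 ≤ b) (hbf : b < f) (ht : 0 ≤ t) :
    fbPos f b (t + 1)
      = fbPos f b t
        + (List.replicate f.toNat 1 ++ List.replicate b.toNat (-1) : List Int).getD
            (t.toNat % (List.replicate f.toNat 1 ++ List.replicate b.toNat (-1) : List Int).length) 0 := by
  have hp : 0 < f + b := by omega
  have hn : (List.replicate f.toNat 1 ++ List.replicate b.toNat (-1) : List Int).length = (f + b).toNat := by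
    simp only [List.length_append, List.length_replicate]; omega
  set c := PySem.Int.floordiv t (f + b) with hc_def
  set r := PySem.Int.mod t (f + b) with hrdef
  have hsum : c * (f + b) + r = t := PySem.Int.floordiv_mul_add_mod t (f + b)
  have hr0 : 0 ≤ r := by
    rw [hrdef, PySem.Int.mod_eq_emod_of_pos hp]; exact Int.emod_nonneg t hp.ne.symm
  have hrp : r < f + b := by
    rw [hrdef, PySem.Int.mod_eq_emod_of_pos hp]; exact Int.emod_lt_of_pos t hp
  -- the pattern entry
  have hmodcast : PySem.Int.mod t (f + b) = ((t.toNat % (f + b).toNat : Nat) : Int) := by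
    have h1 : t = ((t.toNat : Nat) : Int) := by omega
    have h2 : f + b = (((f + b).toNat : Nat) : Int) := by omega
    rw [hrdef] at *
    calc PySem.Int.mod t (f + b) = PySem.Int.mod ((t.toNat : Nat) : Int) (((f + b).toNat : Nat) : Int) := by rw [← h1, ← h2]
      _ = ((t.toNat % (f + b).toNat : Nat) : Int) := PySem.Int.mod_natCast _ _
  have hgd : (List.replicate f.toNat 1 ++ List.replicate b.toNat (-1) : List Int).getD
      (t.toNat % (List.replicate f.toNat 1 ++ List.replicate b.toNat (-1) : List Int).length) 0
      = if r < f then 1 else -1 := by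
    rw [hn]
    rw [seq_getD f b hb hbf _ (by rw [← hmodcast]; exact hrp)]
    rw [← hmodcast]
  rw [hgd]
  rw [fbPos_eval f b t hp, fbPos_eval f b (t + 1) hp, ← hc_def, ← hrdef]
  by_cases hlast : r + 1 < f + b
  · have hc1 : PySem.Int.floordiv (t + 1) (f + b) = c := by
      rw [PySem.Int.floordiv_eq_iff_of_pos hp]
      constructor <;> nlinarith
    have hr1 : PySem.Int.mod (t + 1) (f + b) = r + 1 := by
      have := PySem.Int.floordiv_mul_add_mod (t + 1) (f + b)
      rw [hc1] at this; omega
    rw [hc1, hr1]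
    split_ifs <;> omega
  · -- r + 1 = f + b: wrap to the next cycle
    have hreq : r = f + b - 1 := by omega
    have hc1 : PySem.Int.floordiv (t + 1) (f + b) = c + 1 := by
      rw [PySem.Int.floordiv_eq_iff_of_pos hp]
      constructor <;> nlinarith
    have hr1 : PySem.Int.mod (t + 1) (f + b) = 0 := by
      have := PySem.Int.floordiv_mul_add_mod (t + 1) (f + b)
      rw [hc1] at this; nlinarith
    rw [hc1, hr1]
    have hexp : (c + 1) * (f - b) = c * (f - b) + (f - b) := by ring
    rw [hexp]
    split_ifs <;> omega

-- each step moves by exactly ±1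
theorem fbPos_pm (f b t : Int) (hb : 0 ≤ b) (hbf : b < f) (ht : 0 ≤ t) :
    fbPos f b (t + 1) = fbPos f b t + 1 ∨ fbPos f b (t + 1) = fbPos f b t - 1 := by
  have hp : 0 < f + b := by omega
  have hn : (List.replicate f.toNat 1 ++ List.replicate b.toNat (-1) : List Int).length = (f + b).toNat := by
    simp only [List.length_append, List.length_replicate]; omega
  have hstep := fbPos_step f b t hb hbf ht
  have hr : (t.toNat % (f + b).toNat : Nat) < (f + b).toNat := Nat.mod_lt _ (by omega)
  have := seq_getD f b hb hbf (t.toNat % (f + b).toNat) (by omega)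
  rw [hn] at hstep
  rw [this] at hstep
  split_ifs at hstep <;> omega

-- pos at a whole number of cycles
theorem fbPos_mul (f b c : Int) (hb : 0 ≤ b) (hbf : b < f) (_hc : 0 ≤ c) :
    fbPos f b (c * (f + b)) = c * (f - b) := by
  have hp : 0 < f + b := by omega
  rw [fbPos_eval _ _ _ hp]
  have hc1 : PySem.Int.floordiv (c * (f + b)) (f + b) = c := by
    rw [PySem.Int.floordiv_eq_iff_of_pos hp]
    constructor <;> nlinarith
  have hr1 : PySem.Int.mod (c * (f + b)) (f + b) = 0 := by
    have := PySem.Int.floordiv_mul_add_mod (c * (f + b)) (f + b)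
    rw [hc1] at this; omega
  rw [hc1, hr1]
  rw [if_pos (by omega)]
  omega

-- discrete intermediate-value theorem for ±1 walks
theorem ivt (g : Nat → Int) (hstep : ∀ t, g (t + 1) = g t + 1 ∨ g (t + 1) = g t - 1) (N : Int) :
    ∀ T, g 0 ≤ N → N ≤ g T → ∃ t, t ≤ T ∧ g t = N := by
  intro T
  induction T with
  | zero => intro h1 h2; exact ⟨0, le_refl 0, by omega⟩
  | succ T ih =>
    intro h1 h2
    by_cases h : N ≤ g T
    · obtain ⟨t, ht, hg⟩ := ih h1 h
      exact ⟨t, by omega, hg⟩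
    · rcases hstep T with hs | hs
      · exact ⟨T + 1, le_refl _, by omega⟩
      · omega

-- locations[len-1] is locations[-1]
theorem fbGet_last (L : List String) (hL : 1 ≤ L.length) :
    fbGet L ((L.length : Int) - 1) = fbGet L (-1) := by
  unfold fbGet
  simp [PySem.List.pyGet?, PySem.List.pyIdx?, hL]

-- inside Pre_, the walk reaches a location equal to the last one within (len-1) cycles
theorem hit_exists (L : List String) (f b : Int) (hL : 2 ≤ L.length) (hb : 0 ≤ b) (hbf : b < f) :
    ∃ j : Nat, 1 ≤ j ∧ j ≤ (L.length - 1) * (f + b).toNat ∧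
      fbGet L (fbPos f b (j : Int)) = fbGet L (-1) := by
  have hp : 0 < f + b := by omega
  have hf : 0 ≤ f := by omega
  set T : Nat := (L.length - 1) * (f + b).toNat with hT
  have hcast : ((T : Nat) : Int) = ((L.length : Int) - 1) * (f + b) := by
    rw [hT]
    push_cast
    have : (((L.length - 1 : Nat)) : Int) = (L.length : Int) - 1 := by omega
    rw [this]
    congr 1
    omega
  have hgT : fbPos f b ((T : Nat) : Int) = ((L.length : Int) - 1) * (f - b) := by
    rw [hcast]
    exact fbPos_mul f b _ hb hbf (by omega)
  have hbig : ((L.length : Int) - 1) ≤ ((L.length : Int) - 1) * (f - b) := by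
    nlinarith
  obtain ⟨j, hj, hgj⟩ := ivt (fun n => fbPos f b (n : Int))
    (fun t => fbPos_pm f b (t : Int) hb hbf (by omega)) ((L.length : Int) - 1) T
    (by show fbPos f b ((0 : Nat) : Int) ≤ (L.length : Int) - 1
        simp only [Nat.cast_zero]
        rw [fbPos_zero f b hp hf]
        omega)
    (by show (L.length : Int) - 1 ≤ fbPos f b ((T : Nat) : Int)
        rw [hgT]; exact hbig)
  have hgj' : fbPos f b ((j : Nat) : Int) = (L.length : Int) - 1 := hgj
  have hj1 : 1 ≤ j := by
    by_contra h
    have hj0 : j = 0 := by omega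
    rw [hj0] at hgj'
    simp only [Nat.cast_zero] at hgj'
    rw [fbPos_zero f b hp hf] at hgj'
    omega
  refine ⟨j, hj1, hj, ?_⟩
  rw [hgj']
  exact fbGet_last L (by omega)

-- the search always moves forward
theorem fbFind_ge (L : List String) (last : String) (f b : Int) :
    ∀ (F : Nat) (t : Int), t ≤ fbFind L last f b F t := by
  intro F
  induction F with
  | zero => intro t; exact le_refl t
  | succ F ih =>
    intro t
    simp only [fbFind]
    split
    · exact le_refl t
    · exact le_trans (by omega) (ih (t + 1))

-- main bridge: pairs along the step walk = B's range-map, provided the walk hits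
-- a location equal to `last` within the step budget
theorem walk_eq_range (L : List String) (f b : Int) (hb : 0 ≤ b) (hbf : b < f) :
    ∀ (F : Nat) (t : Int), 0 ≤ t →
      (∃ j : Int, t < j ∧ j ≤ t + (F : Int) ∧ fbGet L (fbPos f b j) = fbGet L (-1)) →
      fbPairs L (fbPos f b t)
          (fbWalk L (fbGet L (-1)) (List.replicate f.toNat 1 ++ List.replicate b.toNat (-1))
            F t.toNat (fbPos f b t))
        = (PySem.List.pyRange t (fbFind L (fbGet L (-1)) f b F (t + 1)) 1).map
            (fun k => (fbGet L (fbPos f b k), fbGet L (fbPos f b (k + 1)))) := by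
  intro F
  induction F with
  | zero =>
    intro t ht hhit
    obtain ⟨j, h1, h2, _⟩ := hhit
    omega
  | succ F ih =>
    intro t ht hhit
    have hstep := fbPos_step f b t hb hbf ht
    rw [fbWalk]
    rw [← hstep]
    simp only [fbFind]
    by_cases hhit1 : fbGet L (fbPos f b (t + 1)) = fbGet L (-1)
    · rw [if_pos hhit1, if_pos hhit1]
      rw [PySem.List.pyRange_one_singleton]
      simp [fbPairs]
    · rw [if_neg hhit1, if_neg hhit1]
      have htn : (t + 1).toNat = t.toNat + 1 := by omega
      obtain ⟨j, h1, h2, h3⟩ := hhit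
      have hjne : j ≠ t + 1 := by
        intro h; rw [h] at h3; exact hhit1 h3
      have hrec := ih (t + 1) (by omega) ⟨j, by omega, by omega, h3⟩
      rw [htn] at hrec
      simp only [fbPairs]
      rw [hrec]
      have hT : t + 1 + 1 ≤ fbFind L (fbGet L (-1)) f b F (t + 1 + 1) := fbFind_ge L _ f b F _
      conv_rhs => rw [PySem.List.pyRange_one_cons (show t < fbFind L (fbGet L (-1)) f b F (t + 1 + 1) by omega)]
      simp

-- the two ports agree on every input satisfying Pre_
theorem fb_ports_eq (L : List String) (f b : Int) (hpre : Pre_forward_back L f b) :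
    forward_back L f b = forward_back_alt L f b := by
  obtain ⟨hL, hb, hbf⟩ := hpre
  have hp : 0 < f + b := by omega
  have hf : 0 ≤ f := by omega
  have hn : (List.replicate f.toNat 1 ++ List.replicate b.toNat (-1) : List Int).length = (f + b).toNat := by
    simp only [List.length_append, List.length_replicate]; omega
  rw [A_eq_pairs]
  unfold forward_back_alt
  obtain ⟨j, hj1, hj2, hj3⟩ := hit_exists L f b hL hb hbf
  have hhit : ∃ jz : Int, (0 : Int) < jz ∧
      jz ≤ 0 + ((L.length * (List.replicate f.toNat 1 ++ List.replicate b.toNat (-1) : List Int).length : Nat) : Int) ∧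
      fbGet L (fbPos f b jz) = fbGet L (-1) := by
    refine ⟨(j : Int), by exact_mod_cast hj1, ?_, hj3⟩
    rw [hn]
    have hle : j ≤ L.length * (f + b).toNat := le_trans hj2 (by
      have : L.length - 1 ≤ L.length := by omega
      exact Nat.mul_le_mul_right _ this)
    push_cast
    omega
  have := walk_eq_range L f b hb hbf
    (L.length * (List.replicate f.toNat 1 ++ List.replicate b.toNat (-1) : List Int).length) 0
    (le_refl 0) hhit
  rw [fbPos_zero f b hp hf] at this
  simp only [Int.toNat_zero] at this
  rw [this]
  rw [hn]
  norm_num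

-- ===== VERDICT (by name: the statement is the Claim_ definition above) =====
theorem forward_back_spec : Claim_equal_forward_back := by
  intro L f b _ hpre
  unfold Spec_forward_back
  exact fb_ports_eq L f b hpre
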